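-- pv_equiv track=rewrite | github.com/omobolajisonde/Fyyur | app.py | error_msg_constructor
-- ===== SOURCE A (Python) =====
-- def error_msg_constructor(error_dict):
--     error_msg = ""
--     keys = list(error_dict.keys())
--     values = list(error_dict.values())
--     for i in range(len(error_dict)):
--         if (i+1) == len(error_dict):
--             error_msg = error_msg + values[i][0] + " for " + keys[i] + "."
--             continue
--         if (i+2) == len(error_dict):
--             error_msg = error_msg + \
--                 values[i][0] + " for " + keys[i] + " and "
--             continue
--         error_msg = error_msg + values[i][0] + " for " + keys[i] + ", "
--     return error_msg
-- ===== SOURCE B (Python) =====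
-- def error_msg_constructor(error_dict):
--     parts = [v[0] + " for " + k for k, v in error_dict.items()]
--     if not parts:
--         return ""
--     if len(parts) == 1:
--         return parts[0] + "."
--     return ", ".join(parts[:-1]) + " and " + parts[-1] + "."
-- ===== Notes on version B (the rewrite author's own statement) =====
-- stated objective: simpler
-- what changed: A decides the separator per index inside the loop by comparing i to len(dict) and grows the message by repeated string concatenation; B builds the per-entry strings once and assembles the message in a single post-pass (empty -> '', one entry -> part + '.', otherwise ', '.join(all but last) + ' and ' + last + '.').
import Mathlib
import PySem

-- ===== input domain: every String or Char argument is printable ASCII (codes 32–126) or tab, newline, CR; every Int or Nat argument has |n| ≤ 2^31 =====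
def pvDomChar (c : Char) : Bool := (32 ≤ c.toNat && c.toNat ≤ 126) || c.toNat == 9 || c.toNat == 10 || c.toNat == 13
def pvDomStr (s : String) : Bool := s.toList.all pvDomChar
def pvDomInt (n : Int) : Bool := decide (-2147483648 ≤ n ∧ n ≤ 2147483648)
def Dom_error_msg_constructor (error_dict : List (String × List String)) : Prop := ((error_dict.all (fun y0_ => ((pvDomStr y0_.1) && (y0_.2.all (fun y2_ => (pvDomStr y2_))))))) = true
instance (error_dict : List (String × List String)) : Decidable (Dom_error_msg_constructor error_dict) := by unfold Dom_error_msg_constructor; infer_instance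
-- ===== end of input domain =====

-- B replaces A's per-index separator branching by building the per-entry strings once and
-- assembling them in a single post-pass (join of all but the last, " and ", last, "."): simpler.

-- ===== PORT A =====
-- one loop step of A: error_msg is the accumulator, i the running index;
-- n = len(error_dict), keys = list(error_dict.keys()), values = list(error_dict.values())
def pvAStep (n : Int) (keys : List String) (values : List (List String)) (error_msg : String) (i : Int) : String :=
  if i + 1 = n then
    error_msg ++ (PySem.List.pyGet? ((PySem.List.pyGet? values i).getD []) 0).getD "" ++ " for " ++ (PySem.List.pyGet? keys i).getD "" ++ "."
  else if i + 2 = n then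
    error_msg ++ (PySem.List.pyGet? ((PySem.List.pyGet? values i).getD []) 0).getD "" ++ " for " ++ (PySem.List.pyGet? keys i).getD "" ++ " and "
  else
    error_msg ++ (PySem.List.pyGet? ((PySem.List.pyGet? values i).getD []) 0).getD "" ++ " for " ++ (PySem.List.pyGet? keys i).getD "" ++ ", "

def error_msg_constructor (error_dict : List (String × List String)) : String :=
  let keys := error_dict.map Prod.fst
  let values := error_dict.map Prod.snd
  (PySem.List.pyRange 0 (error_dict.length : Int)).foldl
    (pvAStep (error_dict.length : Int) keys values) ""

-- ===== PORT B =====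
def error_msg_constructor_alt (error_dict : List (String × List String)) : String :=
  let parts := error_dict.map (fun kv => (PySem.List.pyGet? kv.2 0).getD "" ++ " for " ++ kv.1)
  if parts.length = 0 then ""
  else if parts.length = 1 then (PySem.List.pyGet? parts 0).getD "" ++ "."
  else PySem.Str.join ", " (PySem.List.slice parts none (some (-1))) ++ " and " ++ (PySem.List.pyGet? parts (-1)).getD "" ++ "."

-- ===== PRECONDITION & SPEC =====
-- Pre_ excludes dicts in which some value list is empty (there A raises IndexError on values[i][0]),
-- and association lists with duplicate keys, which do not represent any Python dict.
def Pre_error_msg_constructor (error_dict : List (String × List String)) : Prop :=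
  (∀ p ∈ error_dict, p.2 ≠ []) ∧ (error_dict.map Prod.fst).Nodup
instance (error_dict : List (String × List String)) : Decidable (Pre_error_msg_constructor error_dict) := by unfold Pre_error_msg_constructor; infer_instance

def pvWitness_error_msg_constructor : (List (String × List String)) :=
  [("name", ["An error occurred"]), ("city", ["Invalid city"])]

def Spec_error_msg_constructor (error_dict : List (String × List String)) (out : String) : Prop := out = error_msg_constructor_alt error_dict
instance (error_dict : List (String × List String)) (out : String) : Decidable (Spec_error_msg_constructor error_dict out) := by unfold Spec_error_msg_constructor; infer_instance

-- ===== CLAIM (what is proved, stated in full; the proofs are below) =====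
def Claim_equal_error_msg_constructor : Prop := ∀ (error_dict : List (String × List String)), Dom_error_msg_constructor error_dict → Pre_error_msg_constructor error_dict → Spec_error_msg_constructor error_dict (error_msg_constructor error_dict)

-- ===== LEMMAS AND PROOFS =====

-- the per-entry string "v[0] for k"
def pvPart (p : String × List String) : String :=
  (PySem.List.pyGet? p.2 0).getD "" ++ " for " ++ p.1

-- the common recursive characterisation of both results, on the list of per-entry strings
def pvH : List String → String
  | [] => ""
  | [x] => x ++ "."
  | [x, y] => x ++ " and " ++ y ++ "."
  | x :: y :: z :: l => x ++ ", " ++ pvH (y :: z :: l)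

theorem pv_join_singleton (x : String) : PySem.Str.join ", " [x] = x := by
  simp [PySem.Str.join, PySem.Chars.join, List.intercalate]

theorem pv_ofList_comma (t : List Char) :
    String.ofList (',' :: ' ' :: t) = ", " ++ String.ofList t := by
  rw [show (',' :: ' ' :: t) = (", ").toList ++ t from rfl, String.ofList_append]
  congr 1

theorem pv_join_cons_cons (x y : String) (l : List String) :
    PySem.Str.join ", " (x :: y :: l) = x ++ ", " ++ PySem.Str.join ", " (y :: l) := by
  simp [PySem.Str.join, PySem.Chars.join, List.intercalate, String.ofList_append,
    pv_ofList_comma, String.append_assoc]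

theorem pv_pyGet_neg_one (x : String) (l : List String) :
    (PySem.List.pyGet? (x :: l) (-1)).getD "" = (x :: l).getLast?.getD "" := by
  have h : PySem.List.pyGet? (x :: l) (-1) = (x :: l).getLast? := by
    simp [PySem.List.pyGet?, PySem.List.pyIdx?, List.getLast?_eq_getElem?]
  rw [h]

-- back half of B (join of all but last, " and ", last, ".") equals pvH on lists of length ≥ 2
theorem pv_tail_eq (x y : String) (l : List String) :
    PySem.Str.join ", " ((x :: y :: l).dropLast) ++ " and " ++
      ((x :: y :: l).getLast?.getD "") ++ "." = pvH (x :: y :: l) := by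
  induction l generalizing x y with
  | nil => simp [pvH, pv_join_singleton]
  | cons z l ih =>
    have h0 : (x :: y :: z :: l).dropLast = x :: (y :: z :: l).dropLast := by simp
    rw [h0]
    rcases h : (y :: z :: l).dropLast with _ | ⟨a, as⟩
    · simp at h
    · rw [pv_join_cons_cons, ← h]
      have hlast : (x :: y :: z :: l).getLast? = (y :: z :: l).getLast? := by
        simp [List.getLast?_cons_cons]
      rw [hlast, pvH, ← ih y z]
      simp [String.append_assoc]

-- B equals pvH on the per-entry strings
theorem pvB_eq (d : List (String × List String)) :
    error_msg_constructor_alt d = pvH (d.map pvPart) := by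
  rcases d with _ | ⟨p, _ | ⟨q, rest⟩⟩
  · simp [error_msg_constructor_alt, pvH]
  · simp [error_msg_constructor_alt, pvH, pvPart, PySem.List.pyGet?, PySem.List.pyIdx?]
  · show error_msg_constructor_alt (p :: q :: rest) = _
    unfold error_msg_constructor_alt
    simp only [List.map_cons, List.length_cons]
    rw [if_neg (by simp), if_neg (by simp), PySem.List.slice_to_neg_one, pv_pyGet_neg_one]
    exact pv_tail_eq _ _ _

-- A's loop, started at index j with the rest of the dict still to process, appends pvH of the rest
theorem pvA_loop (full : List (String × List String)) (d : List (String × List String))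
    (j : Nat) (hd : full.drop j = d) (acc : String) :
    (PySem.List.pyRange (j : Int) (full.length : Int)).foldl
      (pvAStep (full.length : Int) (full.map Prod.fst) (full.map Prod.snd)) acc
      = acc ++ pvH (d.map pvPart) := by
  induction d generalizing j acc with
  | nil =>
    have hj : full.length ≤ j := by
      by_contra h
      have := List.drop_eq_nil_iff.mp hd
      omega
    have hr : PySem.List.pyRange (j : Int) (full.length : Int) = [] := by
      simp [PySem.List.pyRange]
      omega
    simp [hr, pvH]
  | cons p d' ih =>
    have hj : j < full.length := by
      by_contra h
      rw [List.drop_eq_nil_iff.mpr (by omega)] at hd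
      exact (List.cons_ne_nil _ _) hd.symm
    have hget : full[j]? = some p := by
      have := List.getElem?_drop (xs := full) (i := j) (j := 0)
      rw [hd] at this
      simpa using this.symm
    have hlen : full.length = j + 1 + d'.length := by
      have h1 : (full.drop j).length = full.length - j := List.length_drop
      rw [hd] at h1
      simp at h1
      omega
    have hd' : full.drop (j + 1) = d' := by
      have : full.drop (j + 1) = (full.drop j).drop 1 := by
        rw [List.drop_drop]
      rw [this, hd]
      simp
    have hkey : PySem.List.pyGet? (full.map Prod.fst) ((j : Nat) : Int) = some p.1 := by
      rw [PySem.List.pyGet?_natCast]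
      simp [hget]
    have hval : PySem.List.pyGet? (full.map Prod.snd) ((j : Nat) : Int) = some p.2 := by
      rw [PySem.List.pyGet?_natCast]
      simp [hget]
    rw [PySem.List.pyRange_one_cons (by exact_mod_cast hj)]
    rw [List.foldl_cons]
    have hstep : ((j : Int) + 1) = ((j + 1 : Nat) : Int) := by push_cast; ring
    rw [hstep, ih (j + 1) hd']
    rcases d' with _ | ⟨q, _ | ⟨r, rest⟩⟩
    · -- last entry: " . " branch
      simp only [List.length_nil] at hlen
      have h1 : ((j : Int) + 1 = (full.length : Int)) := by push_cast [hlen]; omega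
      rw [pvAStep, if_pos h1]
      simp [pvH, pvPart, hkey, hval, String.append_assoc]
    · -- second-to-last entry: " and " branch
      simp only [List.length_cons, List.length_nil] at hlen
      have h1 : ¬((j : Int) + 1 = (full.length : Int)) := by push_cast [hlen]; omega
      have h2 : ((j : Int) + 2 = (full.length : Int)) := by push_cast [hlen]; omega
      rw [pvAStep, if_neg h1, if_pos h2]
      simp [pvH, pvPart, hkey, hval, String.append_assoc]
    · -- ordinary entry: ", " branch
      simp only [List.length_cons] at hlen
      have h1 : ¬((j : Int) + 1 = (full.length : Int)) := by push_cast [hlen]; omega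
      have h2 : ¬((j : Int) + 2 = (full.length : Int)) := by push_cast [hlen]; omega
      rw [pvAStep, if_neg h1, if_neg h2]
      simp [pvH, pvPart, hkey, hval, String.append_assoc]

theorem pvA_eq (d : List (String × List String)) :
    error_msg_constructor d = pvH (d.map pvPart) := by
  unfold error_msg_constructor
  have := pvA_loop d d 0 (by simp) ""
  simpa using this

-- ===== VERDICT (by name: the statement is the Claim_ definition above) =====
theorem error_msg_constructor_spec : Claim_equal_error_msg_constructor := by
  intro d _ _
  unfold Spec_error_msg_constructor
  rw [pvA_eq, pvB_eq]
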